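-- pv_equiv track=rewrite | github.com/Houdini9494/Encoder | encoder.py | str_to_bin
-- ===== SOURCE A (Python) =====
-- def conv_base(numero,nuova_base):
--     if numero == 0:
--         return [0]
--     risultato=[]
--     while numero>0:
--         resto=numero%nuova_base
--         risultato.append(resto)
--         numero//=nuova_base
--     risultato.reverse()
--     return risultato
--
-- def str_to_bin(stringa):
--     # converte una stringa in una lista di numeri usando la tabella ASCII
--     stringa_ascii=[]
--     for i in stringa:
--         stringa_ascii.append(ord(i))
--
--     # converte ogni numero della lista in binario
--     stringa_binario=[]
--     for i in stringa_ascii: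
--         # map() applica la funzione str() ad ogni elemento della lista restituita dalla funz. conv_base(), quindi converte tutti gli int a str
--         # "".join() unisce tutti gli elem. della lista di stringhe prodotta da map() in una unica stringa senza spazi e senza virgole di separazione
--         stringa_binario.append("".join(map(str,conv_base(i,2))))
--
--     # formatta il risultato unendo le liste di valori binari; ogni lettera è una lista binaria quindi devono essere unite tutte in una stringa unica
--     risultato="".join(stringa_binario)
--     return risultato
-- ===== SOURCE B (Python) =====
-- def str_to_bin(stringa):
--     return "".join(format(ord(c), "b") for c in stringa)
-- ===== Notes on version B (the rewrite author's own statement) =====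
-- stated objective: idiomatic
-- what changed: Replaces the hand-rolled repeated mod/div base-conversion loop with list reversal and per-digit str() joins by a single built-in binary-formatting call per character, joined once.
import Mathlib
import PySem

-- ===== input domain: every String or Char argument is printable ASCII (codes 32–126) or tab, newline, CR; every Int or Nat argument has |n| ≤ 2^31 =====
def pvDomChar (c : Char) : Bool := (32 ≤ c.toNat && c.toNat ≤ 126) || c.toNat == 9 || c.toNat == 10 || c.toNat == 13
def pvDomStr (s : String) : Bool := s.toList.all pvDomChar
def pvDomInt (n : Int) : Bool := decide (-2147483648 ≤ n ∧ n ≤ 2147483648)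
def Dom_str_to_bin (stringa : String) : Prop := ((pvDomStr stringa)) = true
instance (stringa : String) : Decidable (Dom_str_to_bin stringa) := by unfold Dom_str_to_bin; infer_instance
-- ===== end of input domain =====

-- B replaces A's hand-rolled mod/div base-conversion helper by one binary-formatting call per character (idiomatic; same cost).

-- ===== PORT A =====
-- the 'while numero>0' loop of conv_base; fuel only makes the same computation total
-- (numero.toNat + 1 steps always suffice for base 2, the only base str_to_bin uses)
def convLoop : Nat → Int → Int → List Int → List Int
  | 0, _, _, risultato => risultato
  | fuel + 1, numero, nuova_base, risultato =>
    if numero > 0 then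
      convLoop fuel (PySem.Int.floordiv numero nuova_base) nuova_base
        (risultato ++ [PySem.Int.mod numero nuova_base])
    else risultato

def conv_base (numero nuova_base : Int) : List Int :=
  if numero == 0 then [0]
  else (convLoop (numero.toNat + 1) numero nuova_base []).reverse

def str_to_bin (stringa : String) : String :=
  let stringa_ascii := stringa.toList.map (fun i => (i.toNat : Int))
  let stringa_binario :=
    stringa_ascii.map (fun i => String.join ((conv_base i 2).map PySem.Int.toStr))
  String.join stringa_binario

-- ===== PORT B =====
-- format(ord(c), "b") ported as Nat.toDigits 2 (base-2 digits, no padding, '0' for 0)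
def str_to_bin_alt (stringa : String) : String :=
  String.join (stringa.toList.map (fun c => String.mk (Nat.toDigits 2 c.toNat)))

-- ===== PRECONDITION & SPEC =====
def Spec_str_to_bin (stringa : String) (out : String) : Prop := out = str_to_bin_alt stringa
instance (stringa : String) (out : String) : Decidable (Spec_str_to_bin stringa out) := by unfold Spec_str_to_bin; infer_instance

-- ===== CLAIM (what is proved, stated in full; the proofs are below) =====
def Claim_equal_str_to_bin : Prop := ∀ (stringa : String), Dom_str_to_bin stringa → Spec_str_to_bin stringa (str_to_bin stringa)

-- ===== LEMMAS AND PROOFS =====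

-- per-character agreement of the two ports on the whole domain, by kernel evaluation
theorem perChar_eq : ∀ n : Nat, n < 127 →
    String.join ((conv_base (n : Int) 2).map PySem.Int.toStr) = String.mk (Nat.toDigits 2 n) := by
  decide

theorem perChar_eq' (c : Char) (h : pvDomChar c = true) :
    String.join ((conv_base ((c.toNat : Int)) 2).map PySem.Int.toStr) = String.mk (Nat.toDigits 2 c.toNat) := by
  apply perChar_eq
  simp [pvDomChar] at h
  omega

-- ===== VERDICT (by name: the statement is the Claim_ definition above) =====
theorem str_to_bin_spec : Claim_equal_str_to_bin := by
  intro stringa hdom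
  unfold Spec_str_to_bin str_to_bin str_to_bin_alt
  simp only [List.map_map]
  congr 1
  apply List.map_congr_left
  intro c hc
  have h : pvDomChar c = true := by
    have := hdom
    unfold Dom_str_to_bin pvDomStr at this
    exact List.all_eq_true.mp this c hc
  exact perChar_eq' c h
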